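-- pv_equiv track=rewrite | github.com/zeyu-chen/25t1-comp9021-labs | Lab 5/Solutions/ex_3_sol.py | f3_1
-- ===== SOURCE A (Python) =====
-- def f3_1(L: list[list[list[int]]], n: int) -> tuple[list[list[int]], list[list[int]]]:
--     """
--     Processes a 3-level nested list structure based on specific conditions.
--
--     Returns a pair of lists of lists:
--     1. First list: For each L' in L with length >= n, collect all positive integers
--        from members of L' whose elements sum to a positive number.
--     2. Second list: For each L' in L with length >= n and for each L'' in L'
--        whose elements sum to a positive number, collect all positive integers from L''.
--
--     This implementation uses nested list comprehensions for a concise solution.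
--
--     Args:
--         L: A list of lists of lists of integers
--         n: Minimum length requirement for sublists
--
--     Returns:
--         A tuple of two lists of lists of positive integers
--     """
--     # First list: For each L1 in L whose length >= n,
--     # collect all positive elements from those L2 in L1 whose sum > 0
--     first_list = [[e for L2 in L1 if sum(L2) > 0
--                      for e in L2 if e > 0
--                  ] for L1 in L if len(L1) >= n
--                 ]
--
--     # Second list: For each L1 in L whose length >= n,
--     # and for each L2 in L1 whose sum > 0,
--     # create a list of all positive elements in L2
--     second_list = [[e for e in L2 if e > 0]
--                      for L1 in L if len(L1) >= n
--                          for L2 in L1 if sum(L2) > 0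
--                 ]
--
--     return (first_list, second_list)
-- ===== SOURCE B (Python) =====
-- def f3_1(L, n):
--     # Stage 1: one pass builds second_list and, per qualifying L1, how many
--     # of its sublists contributed (counts).
--     counts = []
--     second_list = []
--     for L1 in L:
--         if len(L1) >= n:
--             k = 0
--             for L2 in L1:
--                 if sum(L2) > 0:
--                     second_list.append([e for e in L2 if e > 0])
--                     k += 1
--             counts.append(k)
--     # Stage 2: first_list is derived from second_list by slicing it into
--     # consecutive chunks of the recorded sizes and concatenating each chunk.
--     first_list = []
--     rest = second_list
--     for k in counts:
--         chunk, rest = rest[:k], rest[k:]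
--         merged = []
--         for pos in chunk:
--             merged.extend(pos)
--         first_list.append(merged)
--     return (first_list, second_list)
-- ===== Notes on version B (the rewrite author's own statement) =====
-- stated objective: alternative
-- what changed: B computes second_list (with per-group counts) in one pass and then DERIVES first_list from second_list by slicing it into chunks and concatenating, instead of A's second independent comprehension that re-filters the whole input.
import Mathlib
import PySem

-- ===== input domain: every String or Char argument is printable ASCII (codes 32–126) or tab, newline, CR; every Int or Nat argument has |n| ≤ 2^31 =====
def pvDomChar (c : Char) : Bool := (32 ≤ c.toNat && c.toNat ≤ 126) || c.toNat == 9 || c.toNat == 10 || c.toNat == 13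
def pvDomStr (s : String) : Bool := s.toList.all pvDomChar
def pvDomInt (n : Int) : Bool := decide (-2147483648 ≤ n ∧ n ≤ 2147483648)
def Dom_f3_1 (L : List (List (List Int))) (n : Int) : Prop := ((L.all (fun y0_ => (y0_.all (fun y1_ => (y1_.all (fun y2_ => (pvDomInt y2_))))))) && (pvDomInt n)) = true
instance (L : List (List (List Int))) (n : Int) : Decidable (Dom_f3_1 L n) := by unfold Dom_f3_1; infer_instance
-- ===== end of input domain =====

-- B builds second_list once (recording per-group counts) and derives first_list from second_list
-- by chunk slicing, instead of A's second independent filtering comprehension (alternative decomposition).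

-- ===== PORT A =====
-- A: two comprehensions over L, each filtering L1 by length ≥ n and L2 by sum > 0.
def f3_1 (L : List (List (List Int))) (n : Int) : List (List Int) × List (List Int) :=
  ((L.filter (fun L1 => (L1.length : Int) ≥ n)).map (fun L1 =>
      (L1.filter (fun L2 => L2.sum > 0)).flatMap (fun L2 => L2.filter (fun e => e > 0))),
   (L.filter (fun L1 => (L1.length : Int) ≥ n)).flatMap (fun L1 =>
      (L1.filter (fun L2 => L2.sum > 0)).map (fun L2 => L2.filter (fun e => e > 0))))

-- ===== PORT B =====
-- Stage 1 inner loop: per L2 with positive sum, append its positive filter and bump the count.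
def f3_1_altInner (st : Nat × List (List Int)) (L2 : List Int) : Nat × List (List Int) :=
  if L2.sum > 0 then (st.1 + 1, st.2 ++ [L2.filter (fun e => e > 0)]) else st

-- Stage 1 outer loop: state = (counts, second_list).
def f3_1_altOuter (n : Int) (st : List Nat × List (List Int)) (L1 : List (List Int)) :
    List Nat × List (List Int) :=
  if (L1.length : Int) ≥ n then
    let r := L1.foldl f3_1_altInner (0, st.2)
    (st.1 ++ [r.1], r.2)
  else st

-- Stage 2 loop: slice off the next chunk of size k from rest and concatenate it.
def f3_1_altChunk (st : List (List Int) × List (List Int)) (k : Nat) :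
    List (List Int) × List (List Int) :=
  (st.1 ++ [(st.2.take k).foldl (fun m pos => m ++ pos) []], st.2.drop k)

def f3_1_alt (L : List (List (List Int))) (n : Int) : List (List Int) × List (List Int) :=
  let s1 := L.foldl (f3_1_altOuter n) ([], [])
  let first_list := (s1.1.foldl f3_1_altChunk ([], s1.2)).1
  (first_list, s1.2)

-- ===== PRECONDITION & SPEC =====
def Spec_f3_1 (L : List (List (List Int))) (n : Int) (out : List (List Int) × List (List Int)) : Prop := out = f3_1_alt L n
instance (L : List (List (List Int))) (n : Int) (out : List (List Int) × List (List Int)) : Decidable (Spec_f3_1 L n out) := by unfold Spec_f3_1; infer_instance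

-- ===== CLAIM =====
def Claim_equal_f3_1 : Prop := ∀ (L : List (List (List Int))) (n : Int), Dom_f3_1 L n → Spec_f3_1 L n (f3_1 L n)

-- ===== LEMMAS AND PROOFS =====

-- per-L1 abbreviations used only by the proofs
def pvPos (L2 : List Int) : List Int := L2.filter (fun e => e > 0)
def pvGroup (L1 : List (List Int)) : List (List Int) :=
  (L1.filter (fun L2 => L2.sum > 0)).map pvPos

lemma pvPos_eq : pvPos = fun L2 => L2.filter (fun e => e > 0) := rfl
lemma pvGroup_eq : pvGroup = fun L1 => (L1.filter (fun L2 => L2.sum > 0)).map pvPos := rfl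

lemma inner_fold (L1 : List (List Int)) (k : Nat) (s : List (List Int)) :
    L1.foldl f3_1_altInner (k, s) = (k + (pvGroup L1).length, s ++ pvGroup L1) := by
  induction L1 generalizing k s with
  | nil => simp [pvGroup]
  | cons L2 rest ih =>
    simp only [List.foldl_cons, f3_1_altInner]
    by_cases h : L2.sum > 0
    · simp [h, ih, pvGroup, pvPos]
      omega
    · simp [h, ih, pvGroup]

lemma outer_fold (L : List (List (List Int))) (n : Int) (c : List Nat) (s : List (List Int)) :
    L.foldl (f3_1_altOuter n) (c, s) =
      (c ++ ((L.filter (fun L1 => (L1.length : Int) ≥ n)).map (fun L1 => (pvGroup L1).length)),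
       s ++ (L.filter (fun L1 => (L1.length : Int) ≥ n)).flatMap pvGroup) := by
  induction L generalizing c s with
  | nil => simp
  | cons L1 rest ih =>
    simp only [List.foldl_cons, f3_1_altOuter]
    by_cases h : (L1.length : Int) ≥ n
    · rw [if_pos h, inner_fold, ih]
      simp [h]
    · rw [if_neg h, ih]
      simp [h]

lemma chunk_concat (g : List (List Int)) (m : List Int) :
    g.foldl (fun m pos => m ++ pos) m = m ++ g.flatten := by
  induction g generalizing m with
  | nil => simp
  | cons x xs ih => simp [ih]

lemma chunk_fold (Gs : List (List (List Int))) (f : List (List Int)) (extra : List (List Int)) :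
    (Gs.map (fun g => g.length)).foldl f3_1_altChunk (f, Gs.flatten ++ extra) =
      (f ++ Gs.map (fun g => g.flatten), extra) := by
  induction Gs generalizing f with
  | nil => simp
  | cons g rest ih =>
    simp only [List.map_cons, List.foldl_cons, f3_1_altChunk, List.flatten_cons,
      List.append_assoc]
    rw [List.take_left, List.drop_left]
    simp [chunk_concat, ih]

-- ===== VERDICT =====
theorem f3_1_spec : Claim_equal_f3_1 := by
  intro L n _
  unfold Spec_f3_1 f3_1 f3_1_alt
  rw [outer_fold]
  simp only [List.nil_append]
  have h1 : (L.filter (fun L1 => (L1.length : Int) ≥ n)).map (fun L1 => (pvGroup L1).length)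
      = ((L.filter (fun L1 => (L1.length : Int) ≥ n)).map pvGroup).map (fun g => g.length) := by
    simp
  have h2 : (L.filter (fun L1 => (L1.length : Int) ≥ n)).flatMap pvGroup
      = ((L.filter (fun L1 => (L1.length : Int) ≥ n)).map pvGroup).flatten ++ [] := by
    simp [List.flatMap_def]
  rw [h1, h2, chunk_fold]
  simp [List.map_map, Function.comp, pvGroup_eq, pvPos_eq, List.flatMap_def]
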